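-- pv_equiv track=rewrite | github.com/ja228williams/WordleSolver | optimal_guess.py | setup_scoring_dict
-- ===== SOURCE A (Python) =====
-- def setup_scoring_dict(guesses):
--     """
--     Creates the scoring dictionary based on guesses. This scoring dictionary maps each index (each position in the five
--     letter word) to a dictionary mapping letters to a value based on the frequency of that letter in other words in
--     guesses, and especially in the same position in these other words.
--
--     :param guesses: the set of guesses that the scoring dictionary is based on.
--     :return: the previously described scoring dictionary.
--     """
--     points_dict = dict()
--     for i in range(5):
--         points_dict[i] = dict()
--
--     for guess in guesses:
--         for i in range(5):
--             for j in range(5):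
--                 # increments the corresponding value in the dictionary by a higher amount if the letter is in the same
--                 # position as in guess
--                 if i == j:
--                     letter = guess[i]
--                     if letter not in points_dict[i]:
--                         points_dict[i][letter] = 0
--                     points_dict[i][letter] += 3
--                 else:
--                     letter = guess[j]
--                     if letter not in points_dict[i]:
--                         points_dict[i][letter] = 0
--                     points_dict[i][letter] += 1
--
--     return points_dict
-- ===== SOURCE B (Python) =====
-- def setup_scoring_dict(guesses):
--     # Two counting passes (total letter counts + per-position counts) and one
--     # assembly pass, instead of A's 25-increment inner loop per guess.
--     letters = [g[j] for g in guesses for j in range(5)]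
--     total = {}
--     for ch in letters:
--         total[ch] = total.get(ch, 0) + 1
--     result = {}
--     for i in range(5):
--         cnt = {}
--         for g in guesses:
--             ch = g[i]
--             cnt[ch] = cnt.get(ch, 0) + 1
--         result[i] = {ch: 2 * cnt.get(ch, 0) + t for ch, t in total.items()}
--     return result
-- ===== Notes on version B (the rewrite author's own statement) =====
-- stated objective: alternative
-- what changed: A runs a 5x5 nested loop per guess doing 25 conditional dict increments; B counts once (a total letter counter plus per-position counters) and then assembles each position's dict as 2*positional_count + total_count over the total counter's keys.
import Mathlib
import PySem

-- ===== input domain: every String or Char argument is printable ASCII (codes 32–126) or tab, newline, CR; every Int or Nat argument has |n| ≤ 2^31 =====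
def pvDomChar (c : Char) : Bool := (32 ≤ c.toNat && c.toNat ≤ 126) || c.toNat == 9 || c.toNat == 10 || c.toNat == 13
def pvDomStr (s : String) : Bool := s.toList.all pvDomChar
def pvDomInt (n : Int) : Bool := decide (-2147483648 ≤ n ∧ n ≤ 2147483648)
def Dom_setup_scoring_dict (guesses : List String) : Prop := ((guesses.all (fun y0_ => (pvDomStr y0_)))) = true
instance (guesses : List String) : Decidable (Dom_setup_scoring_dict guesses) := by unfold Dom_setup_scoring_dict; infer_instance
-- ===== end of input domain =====

-- B replaces A's triple loop (25 dict increments per guess) by two counting passes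
-- (a total letter counter, per-position counters) plus one assembly pass (objective: alternative).

-- ===== PORT A =====
-- guess[j] as a one-character string key; ' ' is only pyGetD's total default,
-- never reached under Pre_ (every guess has length ≥ 5)
def pvLetter (cs : List Char) (j : Int) : String := String.ofList [PySem.List.pyGetD cs j ' ']

-- "if letter not in points_dict[i]: points_dict[i][letter] = 0; points_dict[i][letter] += amt"
def pvBumpA (pd : PySem.Dict Int (PySem.Dict String Int)) (i : Int) (letter : String) (amt : Int) :
    PySem.Dict Int (PySem.Dict String Int) :=
  let inner := pd.getD i PySem.Dict.empty
  let inner := if inner.contains letter then inner else inner.insert letter 0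
  pd.insert i (inner.modify letter 0 (· + amt))

def setup_scoring_dict (guesses : List String) : List (Int × List (String × Int)) :=
  let pd : PySem.Dict Int (PySem.Dict String Int) :=
    (PySem.List.pyRange 0 5 1).foldl (fun d i => d.insert i PySem.Dict.empty) PySem.Dict.empty
  let pd := guesses.foldl (fun pd guess =>
    (PySem.List.pyRange 0 5 1).foldl (fun pd i =>
      (PySem.List.pyRange 0 5 1).foldl (fun pd j =>
        if i == j then pvBumpA pd i (pvLetter guess.toList i) 3
        else pvBumpA pd i (pvLetter guess.toList j) 1) pd) pd) pd
  pd.items.map (fun p => (p.1, p.2.items))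

-- ===== PORT B =====
def setup_scoring_dict_alt (guesses : List String) : List (Int × List (String × Int)) :=
  let letters := guesses.flatMap (fun g => (PySem.List.pyRange 0 5 1).map (fun j => pvLetter g.toList j))
  let total := letters.foldl (fun d ch => d.insert ch (d.getD ch 0 + 1)) PySem.Dict.empty
  let result := (PySem.List.pyRange 0 5 1).foldl (fun res i =>
    let cnt := guesses.foldl (fun d g => d.insert (pvLetter g.toList i) (d.getD (pvLetter g.toList i) 0 + 1)) PySem.Dict.empty
    res.insert i (PySem.Dict.ofList (total.items.map (fun p => (p.1, 2 * cnt.getD p.1 0 + p.2)))))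
    PySem.Dict.empty
  result.items.map (fun p => (p.1, p.2.items))

-- ===== PRECONDITION & SPEC =====
-- Pre_ excludes exactly the inputs on which Python A raises IndexError: a guess shorter than 5 characters.
def Pre_setup_scoring_dict (guesses : List String) : Prop := ∀ g ∈ guesses, 5 ≤ g.toList.length
instance (guesses : List String) : Decidable (Pre_setup_scoring_dict guesses) := by unfold Pre_setup_scoring_dict; infer_instance
def pvWitness_setup_scoring_dict : List String := ["crane", "slate"]

def Spec_setup_scoring_dict (guesses : List String) (out : List (Int × List (String × Int))) : Prop := out = setup_scoring_dict_alt guesses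
instance (guesses : List String) (out : List (Int × List (String × Int))) : Decidable (Spec_setup_scoring_dict guesses out) := by unfold Spec_setup_scoring_dict; infer_instance

-- ===== CLAIM (what is proved, stated in full; the proofs are below) =====
def Claim_equal_setup_scoring_dict : Prop := ∀ (guesses : List String), Dom_setup_scoring_dict guesses → Pre_setup_scoring_dict guesses → Spec_setup_scoring_dict guesses (setup_scoring_dict guesses)

-- ===== LEMMAS AND PROOFS =====
def pvRow (g : String) : List String := [0,1,2,3,4].map (fun j => pvLetter g.toList j)
def pvAll (gs : List String) : List String := gs.flatMap pvRow
def pvCol (i : Int) (gs : List String) : List String := gs.map (fun g => pvLetter g.toList i)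
def pvStep (i : Int) (g : String) (d : PySem.Dict String Int) : PySem.Dict String Int :=
  [0,1,2,3,4].foldl (fun d j =>
    d.insert (pvLetter g.toList j) (d.getD (pvLetter g.toList j) 0 + (if i == j then 3 else 1))) d
def pvInner (i : Int) (gs : List String) : PySem.Dict String Int :=
  gs.foldl (fun d g => pvStep i g d) PySem.Dict.empty
def pvGuessA (pd : PySem.Dict Int (PySem.Dict String Int)) (g : String) :
    PySem.Dict Int (PySem.Dict String Int) :=
  [0,1,2,3,4].foldl (fun pd i => pd.insert i (pvStep i g (pd.getD i PySem.Dict.empty))) pd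

lemma pvBumpA_eq (pd : PySem.Dict Int (PySem.Dict String Int)) (i : Int) (letter : String) (amt : Int) :
    pvBumpA pd i letter amt =
      pd.insert i ((pd.getD i PySem.Dict.empty).insert letter
        ((pd.getD i PySem.Dict.empty).getD letter 0 + amt)) := by
  unfold pvBumpA
  set d := pd.getD i PySem.Dict.empty with hd
  by_cases hc : d.contains letter
  · simp [hc]
    have : d.modify letter 0 (· + amt) = d.insert letter (d.getD letter 0 + amt) := rfl
    rw [this]
  · simp only [hc, Bool.false_eq_true, if_false]
    have h1 : (d.insert letter 0).modify letter 0 (· + amt)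
        = (d.insert letter 0).insert letter ((d.insert letter 0).getD letter 0 + amt) := rfl
    rw [h1, PySem.Dict.getD_insert_self, PySem.Dict.insert_insert_self,
        PySem.Dict.getD_of_not_contains d 0 (by simpa using hc)]

lemma pv_foldl_rmw (l : List Int) (hne : l ≠ []) (i : Int)
    (f : PySem.Dict String Int → Int → PySem.Dict String Int)
    (pd : PySem.Dict Int (PySem.Dict String Int)) :
    l.foldl (fun pd j => pd.insert i (f (pd.getD i PySem.Dict.empty) j)) pd
      = pd.insert i (l.foldl f (pd.getD i PySem.Dict.empty)) := by
  induction l generalizing pd with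
  | nil => exact absurd rfl hne
  | cons a l ih =>
    cases l with
    | nil => simp [List.foldl]
    | cons b l =>
      rw [List.foldl_cons, ih (by simp),
          PySem.Dict.getD_insert_self, PySem.Dict.insert_insert_self]
      simp [List.foldl_cons]

lemma pv_getD_foldl_not_mem (l : List Int) (i0 : Int) (h : i0 ∉ l)
    (f : PySem.Dict Int (PySem.Dict String Int) → Int → PySem.Dict String Int)
    (pd : PySem.Dict Int (PySem.Dict String Int)) :
    (l.foldl (fun pd i => pd.insert i (f pd i)) pd).getD i0 PySem.Dict.empty
      = pd.getD i0 PySem.Dict.empty := by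
  induction l generalizing pd with
  | nil => rfl
  | cons a l ih =>
    rw [List.foldl_cons, ih (by simp_all)]
    have : i0 ≠ a := by simp_all
    simp [PySem.Dict.getD_insert, this]

lemma pv_getD_foldl_visit (l : List Int) (hnd : l.Nodup) (i0 : Int) (h : i0 ∈ l)
    (g : PySem.Dict String Int → Int → PySem.Dict String Int)
    (pd : PySem.Dict Int (PySem.Dict String Int)) :
    (l.foldl (fun pd i => pd.insert i (g (pd.getD i PySem.Dict.empty) i)) pd).getD i0 PySem.Dict.empty
      = g (pd.getD i0 PySem.Dict.empty) i0 := by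
  induction l generalizing pd with
  | nil => simp at h
  | cons a l ih =>
    rw [List.foldl_cons]
    by_cases ha : i0 = a
    · subst ha
      rw [pv_getD_foldl_not_mem l i0 (by simp_all) _ _, PySem.Dict.getD_insert_self]
    · rw [ih (by simp_all) (by simp_all)]
      simp [PySem.Dict.getD_insert, ha]

lemma pv_keys_foldl (l : List Int)
    (f : PySem.Dict Int (PySem.Dict String Int) → Int → PySem.Dict String Int)
    (pd : PySem.Dict Int (PySem.Dict String Int)) (h : ∀ i ∈ l, pd.contains i = true) :
    (l.foldl (fun pd i => pd.insert i (f pd i)) pd).keys = pd.keys := by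
  induction l generalizing pd with
  | nil => rfl
  | cons a l ih =>
    rw [List.foldl_cons, ih]
    · exact PySem.Dict.keys_insert_of_contains pd _ (h a (by simp))
    · intro i hi
      rw [PySem.Dict.contains_insert]
      simp [h i (List.mem_cons_of_mem _ hi)]

lemma pvGuessA_eq (pd : PySem.Dict Int (PySem.Dict String Int)) (g : String) :
    (PySem.List.pyRange 0 5 1).foldl (fun pd i =>
      (PySem.List.pyRange 0 5 1).foldl (fun pd j =>
        if i == j then pvBumpA pd i (pvLetter g.toList i) 3
        else pvBumpA pd i (pvLetter g.toList j) 1) pd) pd = pvGuessA pd g := by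
  have hr : PySem.List.pyRange 0 5 1 = [0,1,2,3,4] := rfl
  rw [hr]
  unfold pvGuessA
  have hbody : ∀ (pd : PySem.Dict Int (PySem.Dict String Int)) (i : Int),
      ([0,1,2,3,4] : List Int).foldl (fun pd j =>
        if i == j then pvBumpA pd i (pvLetter g.toList i) 3
        else pvBumpA pd i (pvLetter g.toList j) 1) pd
      = pd.insert i (pvStep i g (pd.getD i PySem.Dict.empty)) := by
    intro pd i
    have hf : (fun (pd : PySem.Dict Int (PySem.Dict String Int)) (j : Int) =>
        if i == j then pvBumpA pd i (pvLetter g.toList i) 3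
        else pvBumpA pd i (pvLetter g.toList j) 1)
      = (fun pd j => pd.insert i ((pd.getD i PySem.Dict.empty).insert (pvLetter g.toList j)
          ((pd.getD i PySem.Dict.empty).getD (pvLetter g.toList j) 0 + (if i == j then 3 else 1)))) := by
      funext pd j
      by_cases hij : i = j
      · subst hij; simp [pvBumpA_eq]
      · have : (i == j) = false := by simp [hij]
        simp [this, pvBumpA_eq]
    rw [hf]
    exact pv_foldl_rmw [0,1,2,3,4] (by simp) i
      (fun d j => d.insert (pvLetter g.toList j)
        (d.getD (pvLetter g.toList j) 0 + (if i == j then 3 else 1))) pd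
  rw [show (fun (pd : PySem.Dict Int (PySem.Dict String Int)) (i : Int) =>
      ([0,1,2,3,4] : List Int).foldl (fun pd j =>
        if i == j then pvBumpA pd i (pvLetter g.toList i) 3
        else pvBumpA pd i (pvLetter g.toList j) 1) pd)
    = (fun (pd : PySem.Dict Int (PySem.Dict String Int)) (i : Int) =>
        pd.insert i (pvStep i g (pd.getD i PySem.Dict.empty)))
    from funext fun pd => funext fun i => hbody pd i]
lemma pvStep_keys (i0 : Int) (g : String) (d : PySem.Dict String Int) :
    (pvStep i0 g d).keys = PySem.Set.update d.keys (pvRow g) := by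
  unfold pvStep pvRow
  exact PySem.Dict.keys_foldl_insert_key [0,1,2,3,4] (fun j => pvLetter g.toList j)
    (fun d j => d.getD (pvLetter g.toList j) 0 + (if i0 == j then 3 else 1)) d

lemma pvInner_keys_gen (i0 : Int) (gs : List String) (d : PySem.Dict String Int) :
    (gs.foldl (fun d g => pvStep i0 g d) d).keys = PySem.Set.update d.keys (pvAll gs) := by
  induction gs generalizing d with
  | nil => simp [pvAll, PySem.Set.update_nil]
  | cons g gs ih =>
    rw [List.foldl_cons, ih, pvStep_keys]
    rw [show pvAll (g :: gs) = pvRow g ++ pvAll gs from rfl, PySem.Set.update_append]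

lemma pvInner_keys (i0 : Int) (gs : List String) :
    (pvInner i0 gs).keys = PySem.Set.ofList (pvAll gs) := by
  rw [pvInner, pvInner_keys_gen]
  rw [show (PySem.Dict.empty : PySem.Dict String Int).keys = [] from rfl,
      PySem.Set.update_nil_left]

lemma pvA_outer (gs : List String) (pd : PySem.Dict Int (PySem.Dict String Int))
    (hk : pd.keys = [0,1,2,3,4]) :
    (gs.foldl pvGuessA pd).keys = [0,1,2,3,4] ∧
    ∀ i0 ∈ [(0:Int),1,2,3,4],
      (gs.foldl pvGuessA pd).getD i0 PySem.Dict.empty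
        = gs.foldl (fun d g => pvStep i0 g d) (pd.getD i0 PySem.Dict.empty) := by
  induction gs generalizing pd with
  | nil => exact ⟨hk, fun i0 _ => rfl⟩
  | cons g gs ih =>
    have hcont : ∀ i ∈ [(0:Int),1,2,3,4], pd.contains i = true := by
      intro i hi
      rw [PySem.Dict.contains_eq_decide_mem_keys, hk]
      simpa using hi
    have hk' : (pvGuessA pd g).keys = [0,1,2,3,4] := by
      rw [pvGuessA, pv_keys_foldl _ _ _ hcont, hk]
    obtain ⟨h1, h2⟩ := ih (pvGuessA pd g) hk'
    refine ⟨h1, fun i0 hi0 => ?_⟩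
    rw [List.foldl_cons, h2 i0 hi0]
    have : (pvGuessA pd g).getD i0 PySem.Dict.empty = pvStep i0 g (pd.getD i0 PySem.Dict.empty) := by
      unfold pvGuessA
      exact pv_getD_foldl_visit [0,1,2,3,4] (by decide) i0 hi0
        (fun d i => pvStep i g d) pd
    rw [this, List.foldl_cons]
set_option maxHeartbeats 1000000 in
lemma pv_getD_weighted (key : Int → String) (w : Int → Int) (l : List Int)
    (d : PySem.Dict String Int) (ch : String) :
    (l.foldl (fun d j => d.insert (key j) (d.getD (key j) 0 + w j)) d).getD ch 0
      = d.getD ch 0 + ((l.filter (fun j => key j == ch)).map w).sum := by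
  induction l generalizing d with
  | nil => simp
  | cons j l ih =>
    rw [List.foldl_cons, ih]
    by_cases hc : key j = ch
    · simp [hc]
      ring
    · simp [hc, PySem.Dict.getD_insert, Ne.symm hc]


lemma pvStep_getD (i0 : Int) (h : i0 ∈ [(0:Int),1,2,3,4]) (g : String) (d : PySem.Dict String Int) (ch : String) :
    (pvStep i0 g d).getD ch 0
      = d.getD ch 0 + ((pvRow g).count ch : Int)
          + 2 * (if pvLetter g.toList i0 = ch then 1 else 0) := by
  simp only [List.mem_cons, List.not_mem_nil, or_false] at h
  rcases h with h | h | h | h | h <;> subst h <;>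
    rw [pvStep, pv_getD_weighted (fun j => pvLetter g.toList j)] <;>
    (by_cases h0 : pvLetter g.toList 0 = ch <;>
     by_cases h1 : pvLetter g.toList 1 = ch <;>
     by_cases h2 : pvLetter g.toList 2 = ch <;>
     by_cases h3 : pvLetter g.toList 3 = ch <;>
     by_cases h4 : pvLetter g.toList 4 = ch <;>
       simp [pvRow, h0, h1, h2, h3, h4] <;> ring)

lemma pvInner_getD_gen (i0 : Int) (h : i0 ∈ [(0:Int),1,2,3,4]) (gs : List String)
    (d : PySem.Dict String Int) (ch : String) :
    (gs.foldl (fun d g => pvStep i0 g d) d).getD ch 0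
      = d.getD ch 0 + ((pvAll gs).count ch : Int) + 2 * ((pvCol i0 gs).count ch : Int) := by
  induction gs generalizing d with
  | nil => simp [pvAll, pvCol]
  | cons g gs ih =>
    rw [List.foldl_cons, ih, pvStep_getD i0 h]
    have hall : pvAll (g :: gs) = pvRow g ++ pvAll gs := rfl
    have hcol : pvCol i0 (g :: gs) = pvLetter g.toList i0 :: pvCol i0 gs := rfl
    rw [hall, hcol, List.count_append, List.count_cons]
    by_cases hc : pvLetter g.toList i0 = ch <;> simp [hc] <;> ring

lemma pvInner_getD (i0 : Int) (h : i0 ∈ [(0:Int),1,2,3,4]) (gs : List String) (ch : String) :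
    (pvInner i0 gs).getD ch 0
      = ((pvAll gs).count ch : Int) + 2 * ((pvCol i0 gs).count ch : Int) := by
  rw [pvInner, pvInner_getD_gen i0 h]
  simp

lemma pvA_char (gs : List String) :
    setup_scoring_dict gs = ([0,1,2,3,4] : List Int).map (fun i => (i, (pvInner i gs).items)) := by
  have hzeta : setup_scoring_dict gs
      = (gs.foldl (fun pd guess =>
          (PySem.List.pyRange 0 5 1).foldl (fun pd i =>
            (PySem.List.pyRange 0 5 1).foldl (fun pd j =>
              if i == j then pvBumpA pd i (pvLetter guess.toList i) 3
              else pvBumpA pd i (pvLetter guess.toList j) 1) pd) pd)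
          ((PySem.List.pyRange 0 5 1).foldl (fun d i => d.insert i PySem.Dict.empty)
            PySem.Dict.empty)).items.map (fun p => (p.1, p.2.items)) := rfl
  rw [hzeta]
  rw [show (fun (pd : PySem.Dict Int (PySem.Dict String Int)) (guess : String) =>
      (PySem.List.pyRange 0 5 1).foldl (fun pd i =>
        (PySem.List.pyRange 0 5 1).foldl (fun pd j =>
          if i == j then pvBumpA pd i (pvLetter guess.toList i) 3
          else pvBumpA pd i (pvLetter guess.toList j) 1) pd) pd) = pvGuessA
    from funext fun pd => funext fun g => pvGuessA_eq pd g]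
  have hk0 : ((PySem.List.pyRange 0 5 1).foldl (fun d i => d.insert i PySem.Dict.empty)
      (PySem.Dict.empty : PySem.Dict Int (PySem.Dict String Int))).keys = [0,1,2,3,4] := rfl
  obtain ⟨hk, hg⟩ := pvA_outer gs _ hk0
  rw [PySem.Dict.items_eq_map_keys _ (by rw [hk]; decide) PySem.Dict.empty, hk, List.map_map]
  apply List.map_congr_left
  intro i hi
  simp only [Function.comp]
  rw [hg i hi]
  have h0 : ((PySem.List.pyRange 0 5 1).foldl (fun d i => d.insert i PySem.Dict.empty)
      (PySem.Dict.empty : PySem.Dict Int (PySem.Dict String Int))).getD i PySem.Dict.empty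
      = PySem.Dict.empty := by
    fin_cases hi <;> rfl
  rw [h0, ← pvInner]

lemma pvCnt_eq (i : Int) (gs : List String) :
    gs.foldl (fun d g => d.insert (pvLetter g.toList i) (d.getD (pvLetter g.toList i) 0 + 1)) PySem.Dict.empty
      = PySem.Dict.counter (pvCol i gs) := by
  rw [← PySem.Dict.foldl_insert_getD_add_one_eq_counter, pvCol, List.foldl_map]

lemma pvB_char (gs : List String) :
    setup_scoring_dict_alt gs = ([0,1,2,3,4] : List Int).map (fun i =>
      (i, (PySem.Set.ofList (pvAll gs)).map (fun k =>
            (k, 2 * ((pvCol i gs).count k : Int) + ((pvAll gs).count k : Int))))) := by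
  have hzeta : setup_scoring_dict_alt gs
      = (([0,1,2,3,4] : List Int).foldl (fun res i =>
          res.insert i (PySem.Dict.ofList ((PySem.Dict.counter (pvAll gs)).items.map (fun p =>
            (p.1, 2 * (gs.foldl (fun d g => d.insert (pvLetter g.toList i) (d.getD (pvLetter g.toList i) 0 + 1)) PySem.Dict.empty).getD p.1 0 + p.2)))))
          PySem.Dict.empty).items.map (fun p => (p.1, p.2.items)) := rfl
  rw [hzeta]
  have hfresh := PySem.Dict.items_foldl_insert_fresh (d := (PySem.Dict.empty : PySem.Dict Int (PySem.Dict String Int)))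
    ([0,1,2,3,4] : List Int) (fun i => i)
    (fun i => PySem.Dict.ofList ((PySem.Dict.counter (pvAll gs)).items.map (fun p =>
      (p.1, 2 * (gs.foldl (fun d g => d.insert (pvLetter g.toList i) (d.getD (pvLetter g.toList i) 0 + 1)) PySem.Dict.empty).getD p.1 0 + p.2))))
    (by intro a _; rfl) (by decide)
  rw [hfresh]
  simp only [show (PySem.Dict.empty : PySem.Dict Int (PySem.Dict String Int)).items = [] from rfl,
    List.nil_append, List.map_map]
  apply List.map_congr_left
  intro i hi
  simp only [Function.comp]
  congr 1
  -- inner dict items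
  have hnodup : (((PySem.Dict.counter (pvAll gs)).items.map (fun p =>
      (p.1, 2 * (gs.foldl (fun d g => d.insert (pvLetter g.toList i) (d.getD (pvLetter g.toList i) 0 + 1)) PySem.Dict.empty).getD p.1 0 + p.2))).map Prod.fst).Nodup := by
    rw [List.map_map]
    have : (Prod.fst ∘ fun (p : String × Int) =>
        (p.1, 2 * (gs.foldl (fun d g => d.insert (pvLetter g.toList i) (d.getD (pvLetter g.toList i) 0 + 1)) PySem.Dict.empty).getD p.1 0 + p.2)) = Prod.fst := rfl
    rw [this]
    exact PySem.Dict.nodup_keys_counter (pvAll gs)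
  have hof : ∀ (L : List (String × Int)), (L.map Prod.fst).Nodup →
      (PySem.Dict.ofList L).items = L := by
    intro L hL
    have := PySem.Dict.items_foldl_insert_fresh L Prod.fst Prod.snd PySem.Dict.empty
      (by intro a _; rfl) hL
    simpa [PySem.Dict.ofList] using this
  rw [hof _ hnodup, pvCnt_eq, PySem.Dict.items_counter, List.map_map]
  apply List.map_congr_left
  intro k _
  simp only [Function.comp]
  rw [PySem.Dict.getD_counter]

lemma pv_main (gs : List String) : setup_scoring_dict gs = setup_scoring_dict_alt gs := by
  rw [pvA_char, pvB_char]
  apply List.map_congr_left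
  intro i hi
  congr 1
  rw [PySem.Dict.items_eq_map_keys _ (by rw [pvInner_keys]; exact PySem.Set.nodup_ofList _) 0,
      pvInner_keys]
  apply List.map_congr_left
  intro k _
  rw [pvInner_getD i hi]
  congr 1
  ring

-- ===== VERDICT (by name: the statement is the Claim_ definition above) =====
theorem setup_scoring_dict_spec : Claim_equal_setup_scoring_dict := by
  intro guesses _ _
  unfold Spec_setup_scoring_dict
  exact pv_main guesses
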